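-- pv_equiv track=rewrite | github.com/ccrjohn8787/investing-agent | investing_agent/agents/critic.py | _extract_ref_tokens
-- ===== SOURCE A (Python) =====
-- from typing import List, Set, Optional, Any, Dict
--
-- def _extract_ref_tokens(report_md: str) -> List[str]:
--     """Parse inline reference tokens of the form [ref:token1;token2]."""
--     tokens: List[str] = []
--     i = 0
--     while True:
--         start = report_md.find("[ref:", i)
--         if start == -1:
--             break
--         end = report_md.find("]", start)
--         if end == -1:
--             break
--         body = report_md[start + 5 : end]  # after '[ref:' up to ']'
--         parts = [p.strip() for p in body.split(";") if p.strip()]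
--         tokens.extend(parts)
--         i = end + 1
--     return tokens
-- ===== SOURCE B (Python) =====
-- import re
--
-- _REF_RE = re.compile(r"\[ref:([^\]]*)\]")
--
-- def _extract_ref_tokens(report_md: str) -> list:
--     """Parse inline reference tokens of the form [ref:token1;token2]."""
--     tokens = []
--     for body in _REF_RE.findall(report_md):
--         tokens.extend(p.strip() for p in body.split(";") if p.strip())
--     return tokens
-- ===== Notes on version B (the rewrite author's own statement) =====
-- stated objective: idiomatic
-- what changed: Replaces the hand-written find/index while-loop parser with a single regular-expression scan (re.findall of \[ref:([^\]]*)\]) over the whole string.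
import Mathlib
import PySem

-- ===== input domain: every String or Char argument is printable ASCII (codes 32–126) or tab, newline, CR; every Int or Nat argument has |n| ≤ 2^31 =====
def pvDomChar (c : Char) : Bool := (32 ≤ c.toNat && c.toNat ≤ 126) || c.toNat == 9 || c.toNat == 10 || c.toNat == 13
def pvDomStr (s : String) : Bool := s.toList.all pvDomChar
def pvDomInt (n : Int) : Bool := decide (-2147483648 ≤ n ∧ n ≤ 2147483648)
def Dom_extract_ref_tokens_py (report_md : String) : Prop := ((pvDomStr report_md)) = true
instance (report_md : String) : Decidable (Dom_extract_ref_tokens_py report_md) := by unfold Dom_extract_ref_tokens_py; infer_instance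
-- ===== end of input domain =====

-- B replaces the hand-written find/index while-loop with a single regex-style scan
-- (re.findall of \[ref:([^\]]*)\]); objective: idiomatic, same cost.

-- the literal "[ref:" marker
def pvRefPat : List Char := ['[', 'r', 'e', 'f', ':']

-- shared: Python's  [p.strip() for p in body.split(";") if p.strip()]
def pvParts (body : List Char) : List String :=
  ((((PySem.Chars.splitOn body [';']).map PySem.Chars.strip).filter (fun p => p ≠ [])).map String.ofList)

-- ===== PORT A =====
-- report_md.find("[ref:", i) / report_md.find("]", start): the loop index i is carried
-- as the suffix s = report_md[i:], so both finds are Chars.find on the suffix.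
def pvStartA (s : List Char) : Int := PySem.Chars.find s pvRefPat
def pvEndA (u : List Char) : Int := PySem.Chars.find u [']']

def pvGoA (s : List Char) (acc : List String) : List String :=
  if pvStartA s = -1 then acc                         -- start == -1: break
  else if pvEndA (s.drop (pvStartA s).toNat) = -1 then acc   -- end == -1: break
  else                                                 -- body = s[start+5:end]; i = end+1
    pvGoA ((s.drop (pvStartA s).toNat).drop ((pvEndA (s.drop (pvStartA s).toNat)).toNat + 1))
      (acc ++ pvParts (PySem.List.slice (s.drop (pvStartA s).toNat) (some 5)
                         (some (pvEndA (s.drop (pvStartA s).toNat)))))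
termination_by s.length
decreasing_by
  rename_i h1 _
  have hinf : pvRefPat <:+: s := (PySem.Chars.find_ne_neg_one_iff s pvRefPat).mp h1
  have h5 : 5 ≤ s.length := hinf.length_le
  simp only [List.length_drop]
  omega

def extract_ref_tokens_py (report_md : String) : List String :=
  pvGoA report_md.toList []

-- ===== PORT B =====
-- hand port of re.findall(r"\[ref:([^\]]*)\]", s): at each position try to match the
-- literal "[ref:", then greedily [^\]]* (takeWhile ≠ ']'), then "]"; on success emit the
-- capture and resume after the match, on failure advance one character (exact regex
-- leftmost non-overlapping scan).
def pvFindall : List Char → List (List Char)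
  | [] => []
  | c :: rest =>
    if pvRefPat <+: (c :: rest) then
      if (((c :: rest).drop 5).takeWhile (fun ch => ch ≠ ']')).length < ((c :: rest).drop 5).length then
        (((c :: rest).drop 5).takeWhile (fun ch => ch ≠ ']')) ::
          pvFindall (((c :: rest).drop 5).drop ((((c :: rest).drop 5).takeWhile (fun ch => ch ≠ ']')).length + 1))
      else pvFindall rest
    else pvFindall rest
termination_by cs => cs.length
decreasing_by
  all_goals simp [List.length_drop]

def extract_ref_tokens_py_alt (report_md : String) : List String :=
  (pvFindall report_md.toList).flatMap pvParts

-- ===== PRECONDITION & SPEC =====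
def Spec_extract_ref_tokens_py (report_md : String) (out : List String) : Prop := out = extract_ref_tokens_py_alt report_md
instance (report_md : String) (out : List String) : Decidable (Spec_extract_ref_tokens_py report_md out) := by unfold Spec_extract_ref_tokens_py; infer_instance

-- ===== CLAIM (what is proved, stated in full; the proofs are below) =====
def Claim_equal_extract_ref_tokens_py : Prop := ∀ (report_md : String), Dom_extract_ref_tokens_py report_md → Spec_extract_ref_tokens_py report_md (extract_ref_tokens_py report_md)

-- ===== LEMMAS AND PROOFS =====

theorem singleton_prefix_iff {a : Char} {w : List Char} : [a] <+: w ↔ w[0]? = some a := by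
  cases w with
  | nil => simp
  | cons x xs => simp [List.cons_prefix_cons, eq_comm]

theorem singleton_infix_iff {a : Char} {w : List Char} : [a] <:+: w ↔ a ∈ w := by
  constructor
  · intro h; exact h.mem (by simp)
  · intro h
    obtain ⟨s, t, rfl⟩ := List.append_of_mem h
    exact ⟨s, t, by simp⟩

theorem takeWhile_eq_take_of {p : Char → Bool} {l : List Char} {m : Nat}
    (hm : m < l.length)
    (hall : ∀ i (hi : i < m), p (l[i]'(by omega)) = true)
    (hstop : p (l[m]'hm) = false) : l.takeWhile p = l.take m := by
  induction l generalizing m with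
  | nil => simp at hm
  | cons x xs ih =>
    cases m with
    | zero =>
      simp only [List.getElem_cons_zero] at hstop
      simp [hstop]
    | succ m =>
      have hx : p x = true := hall 0 (by omega)
      rw [List.takeWhile_cons_of_pos hx, List.take_succ_cons]
      exact congrArg (List.cons x) (ih (by simpa using hm) (fun i hi => hall (i+1) (by omega)) (by simpa using hstop))

theorem pvFindall_cons_not_prefix {c : Char} {rest : List Char}
    (h : ¬ pvRefPat <+: (c :: rest)) : pvFindall (c :: rest) = pvFindall rest := by
  rw [pvFindall.eq_def]; simp [h]

theorem pvFindall_skip : ∀ (k : Nat) (cs : List Char), k ≤ cs.length →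
    (∀ i < k, ¬ pvRefPat <+: cs.drop i) → pvFindall cs = pvFindall (cs.drop k) := by
  intro k
  induction k with
  | zero => simp
  | succ k ih =>
    intro cs hk hmin
    cases cs with
    | nil => simp at hk
    | cons c rest =>
      rw [pvFindall_cons_not_prefix (by simpa using hmin 0 (by omega))]
      rw [ih rest (by simpa using hk) (fun i hi => by simpa using hmin (i+1) (by omega))]
      simp

theorem pvFindall_no_rbracket : ∀ (cs : List Char), ']' ∉ cs → pvFindall cs = [] := by
  intro cs
  induction cs with
  | nil => intro _; rw [pvFindall.eq_def]
  | cons c rest ih =>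
    intro h
    have hr : ']' ∉ rest := fun hm => h (by simp [hm])
    rw [pvFindall.eq_def]
    simp only []
    split_ifs with h1 h2
    · exfalso
      have : ((c :: rest).drop 5).takeWhile (fun ch => ch ≠ ']') = ((c :: rest).drop 5) := by
        apply List.takeWhile_eq_self_iff.mpr
        intro x hx
        have : x ∈ c :: rest := List.mem_of_mem_drop hx
        simp only [ne_eq, decide_eq_true_eq]
        rintro rfl; exact h this
      rw [this] at h2
      omega
    · exact ih hr
    · exact ih hr

theorem pvFindall_no_pat : ∀ (cs : List Char), ¬ pvRefPat <:+: cs → pvFindall cs = [] := by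
  intro cs
  induction cs with
  | nil => intro _; rw [pvFindall.eq_def]
  | cons c rest ih =>
    intro h
    rw [pvFindall_cons_not_prefix (fun hp => h hp.isInfix)]
    exact ih (fun hi => h (hi.trans (List.infix_cons_iff.mpr (Or.inr (List.infix_refl rest)) : rest <:+: c :: rest)))

theorem pvGoA_eq : ∀ (n : Nat) (cs : List Char) (acc : List String), cs.length ≤ n →
    pvGoA cs acc = acc ++ (pvFindall cs).flatMap pvParts := by
  intro n
  induction n with
  | zero =>
    intro cs acc h
    have hnil : cs = [] := List.eq_nil_of_length_eq_zero (by omega)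
    subst hnil
    rw [pvGoA]
    norm_num [pvStartA, pvRefPat, PySem.Chars.find_eq_neg_one_iff]
    rw [pvFindall.eq_def]; simp
  | succ n ih =>
    intro cs acc hlen
    rw [pvGoA]
    by_cases h1 : pvStartA cs = -1
    · rw [if_pos h1]
      have hninf : ¬ pvRefPat <:+: cs :=
        (PySem.Chars.find_eq_neg_one_iff cs pvRefPat).mp h1
      rw [pvFindall_no_pat cs hninf]; simp
    · rw [if_neg h1]
      have h0 : (0:Int) ≤ pvStartA cs := by
        have := PySem.Chars.neg_one_le_find cs pvRefPat
        unfold pvStartA at *; omega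
      obtain ⟨hpre, hmin⟩ := PySem.Chars.find_spec (s := cs) (sub := pvRefPat) h0
      have hkle : (pvStartA cs).toNat ≤ cs.length := by
        have := PySem.Chars.find_le_length cs pvRefPat
        unfold pvStartA at *; omega
      have hskip : pvFindall cs = pvFindall (cs.drop (pvStartA cs).toNat) :=
        pvFindall_skip (pvStartA cs).toNat cs hkle (fun i hi => hmin i hi)
      set u := cs.drop (pvStartA cs).toNat with hudef
      have hulen : 5 ≤ u.length := hpre.length_le
      by_cases h2 : pvEndA u = -1
      · rw [if_pos h2]
        have hnr : ']' ∉ u := fun hm =>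
          (PySem.Chars.find_eq_neg_one_iff u [']']).mp h2 (singleton_infix_iff.mpr hm)
        rw [hskip, pvFindall_no_rbracket u hnr]; simp
      · rw [if_neg h2]
        have he0 : (0:Int) ≤ pvEndA u := by
          have := PySem.Chars.neg_one_le_find u [']']
          unfold pvEndA at *; omega
        obtain ⟨hepre, hemin⟩ := PySem.Chars.find_spec (s := u) (sub := [']']) he0
        set e : Nat := (pvEndA u).toNat with hedef
        have hue : u[e]? = some ']' := by
          have := singleton_prefix_iff.mp hepre
          rwa [List.getElem?_drop, Nat.add_zero] at this
        have helt : e < u.length := (List.getElem?_eq_some_iff.mp hue).1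
        have he5 : 5 ≤ e := by
          by_contra hcon
          push_neg at hcon
          obtain ⟨t, hu⟩ := hpre
          have h' : (pvRefPat ++ t)[e]? = some ']' := by rw [hu]; exact hue
          rw [List.getElem?_append_left (by simp [pvRefPat]; omega)] at h'
          interval_cases e <;> simp [pvRefPat] at h'
        -- characterize u[i] for 5 ≤ i < e: not ']'
        have hne : ∀ i, i < e → u[i]? ≠ some ']' := by
          intro i hi hv
          exact hemin i hi (singleton_prefix_iff.mpr (by rw [List.getElem?_drop, Nat.add_zero]; exact hv))
        cases hu : u with
        | nil => simp [hu] at hulen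
        | cons c rest =>
          rw [hskip, hu, pvFindall.eq_def]
          simp only []
          rw [if_pos (hu ▸ hpre), ← hu]
          have htw : (u.drop 5).takeWhile (fun ch => ch ≠ ']') = (u.drop 5).take (e - 5) := by
            refine takeWhile_eq_take_of (m := e - 5) (by simp; omega) ?_ ?_
            · intro i hi
              simp only [decide_eq_true_eq, List.getElem_drop]
              intro hv
              exact hne (5 + i) (by omega)
                (by rw [List.getElem?_eq_getElem (by omega)]; simp [hv])
            · simp only [decide_eq_false_iff_not, not_not, List.getElem_drop]
              have h' : u[5 + (e - 5)]? = some ']' := by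
                rw [show 5 + (e - 5) = e by omega]; exact hue
              have := (List.getElem?_eq_some_iff.mp h').2
              simpa using this
          rw [htw]
          have hlen_take : ((u.drop 5).take (e - 5)).length = e - 5 := by
            simp; omega
          rw [if_pos (by simp; omega)]
          have hdropB : (u.drop 5).drop (((u.drop 5).take (e - 5)).length + 1) =
              u.drop (e + 1) := by
            rw [hlen_take, List.drop_drop]
            congr 1; omega
          have hbody : PySem.List.slice u (some 5) (some (pvEndA u)) =
              (u.drop 5).take (e - 5) := by
            rw [PySem.List.slice_toNat u (by norm_num) he0]
            rfl
          rw [hdropB, hbody]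
          have hrec := ih (u.drop (e + 1))
            (acc ++ pvParts ((u.drop 5).take (e - 5)))
            (by
              have h1len : u.length ≤ cs.length := by rw [hudef]; simp
              simp only [List.length_drop]
              omega)
          rw [hrec]
          simp [List.flatMap_cons, List.append_assoc]

-- ===== VERDICT (by name: the statement is the Claim_ definition above) =====
theorem extract_ref_tokens_py_spec : Claim_equal_extract_ref_tokens_py := by
  intro md _
  unfold Spec_extract_ref_tokens_py extract_ref_tokens_py extract_ref_tokens_py_alt
  simpa using pvGoA_eq md.toList.length md.toList [] le_rfl
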